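-- pv_equiv track=rewrite | github.com/app-sre/qontract-reconcile | reconcile/sentry_helper.py | get_sentry_users_from_mails
-- ===== SOURCE A (Python) =====
-- def get_sentry_users_from_mails(mails):
--     user_names = set()
--     for mail in mails:
--         msg = mail["msg"]
--         user_line = [ln for ln in msg.split("\n") if "is requesting access to" in ln]
--         if not user_line:
--             continue
--         user_line = user_line[0]
--         user_name = user_line.split("is requesting access to")[0].strip()
--         user_names.add(user_name)
--
--     return user_names
-- ===== SOURCE B (Python) =====
-- MARKER = "is requesting access to"
--
--
-- def get_sentry_users_from_mails(mails):
--     user_names = set()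
--     for mail in mails:
--         msg = mail["msg"]
--         idx = msg.find(MARKER)
--         if idx == -1:
--             continue
--         start = msg.rfind("\n", 0, idx) + 1
--         user_names.add(msg[start:idx].strip())
--     return user_names
-- ===== Notes on version B (the rewrite author's own statement) =====
-- stated objective: idiomatic
-- what changed: Instead of splitting each message into a list of lines and filtering them for the marker, B locates the first marker occurrence with str.find and recovers the start of its line with a backward str.rfind, slicing the username straight out of the full text.
import Mathlib
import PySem

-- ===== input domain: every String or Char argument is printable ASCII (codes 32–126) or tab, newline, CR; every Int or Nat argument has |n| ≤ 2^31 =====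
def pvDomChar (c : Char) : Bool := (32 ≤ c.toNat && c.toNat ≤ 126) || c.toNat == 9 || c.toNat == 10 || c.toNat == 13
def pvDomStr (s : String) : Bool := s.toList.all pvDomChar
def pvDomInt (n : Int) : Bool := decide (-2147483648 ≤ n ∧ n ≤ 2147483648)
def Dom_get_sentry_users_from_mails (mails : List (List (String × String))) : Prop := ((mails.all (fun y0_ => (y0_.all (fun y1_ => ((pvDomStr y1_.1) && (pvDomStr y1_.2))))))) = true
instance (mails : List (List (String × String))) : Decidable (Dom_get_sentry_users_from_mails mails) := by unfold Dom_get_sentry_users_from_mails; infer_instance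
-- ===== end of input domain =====

-- B replaces A's split-into-lines-and-filter scan by a direct str.find of the marker
-- plus a backward str.rfind for the start of its line (objective: idiomatic).

def pvMarker : String := "is requesting access to"

-- ===== PORT A =====
-- loop body of A: msg = mail["msg"]; user_line = [ln for ln in msg.split("\n") if marker in ln];
-- if not user_line: continue; user_names.add(user_line[0].split(marker)[0].strip())
-- (msg.split("\n") has a non-empty separator, so split? is some; split(...)[0] is total
-- because str.split always returns a non-empty list, hence pyGetD _ 0 "".)
def pvAStep (user_names : PySem.Set String) (mail : List (String × String)) : PySem.Set String :=
  let msg := (PySem.Dict.ofList mail).getD "msg" ""   -- mail["msg"]; KeyError excluded by Pre_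
  let user_line := ((PySem.Str.split? msg "\n").getD []).filter (fun ln => PySem.Str.isIn pvMarker ln)
  match user_line with
  | [] => user_names
  | ln :: _ =>
      PySem.Set.add user_names
        (PySem.Str.strip (PySem.List.pyGetD ((PySem.Str.split? ln pvMarker).getD []) 0 ""))

def get_sentry_users_from_mails (mails : List (List (String × String))) : List String :=
  mails.foldl pvAStep PySem.Set.empty

-- ===== PORT B =====
-- loop body of B: idx = msg.find(marker); if idx == -1: continue;
-- start = msg.rfind("\n", 0, idx) + 1; user_names.add(msg[start:idx].strip())
def pvBStep (user_names : PySem.Set String) (mail : List (String × String)) : PySem.Set String :=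
  let msg := (PySem.Dict.ofList mail).getD "msg" ""   -- mail["msg"]; KeyError excluded by Pre_
  let idx := PySem.Str.find msg pvMarker
  if idx = -1 then user_names
  else
    let start := PySem.Str.rfindFrom msg "\n" 0 (some idx) + 1
    PySem.Set.add user_names (PySem.Str.strip (PySem.Str.slice msg (some start) (some idx)))

def get_sentry_users_from_mails_alt (mails : List (List (String × String))) : List String :=
  mails.foldl pvBStep PySem.Set.empty

-- ===== PRECONDITION & SPEC =====
-- Pre_ excludes only the mails without a "msg" key, on which A raises KeyError.
def Pre_get_sentry_users_from_mails (mails : List (List (String × String))) : Prop :=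
  ∀ mail ∈ mails, (mail.map Prod.fst).contains "msg" = true
instance (mails : List (List (String × String))) : Decidable (Pre_get_sentry_users_from_mails mails) := by unfold Pre_get_sentry_users_from_mails; infer_instance

def pvWitness_get_sentry_users_from_mails : (List (List (String × String))) :=
  [[("msg", "alice is requesting access to sentry"), ("to", "ops")], [("msg", "hello")]]

def Spec_get_sentry_users_from_mails (mails : List (List (String × String))) (out : List String) : Prop := out = get_sentry_users_from_mails_alt mails
instance (mails : List (List (String × String))) (out : List String) : Decidable (Spec_get_sentry_users_from_mails mails out) := by unfold Spec_get_sentry_users_from_mails; infer_instance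

-- ===== CLAIM (what is proved, stated in full; the proofs are below) =====
def Claim_equal_get_sentry_users_from_mails : Prop := ∀ (mails : List (List (String × String))), Dom_get_sentry_users_from_mails mails → Pre_get_sentry_users_from_mails mails → Spec_get_sentry_users_from_mails mails (get_sentry_users_from_mails mails)

-- ===== LEMMAS AND PROOFS =====

-- the marker and the newline separator as character lists
def pvM : List Char := pvMarker.toList
def pvNL : List Char := ['\n']

-- what A's loop body adds for a message, at the character level
def pvAName (cs : List Char) : Option (List Char) :=
  match (PySem.Chars.splitOn cs pvNL).filter (fun ln => PySem.Chars.isIn pvM ln) with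
  | [] => none
  | ln :: _ => some (PySem.Chars.strip (PySem.List.pyGetD (PySem.Chars.splitOn ln pvM) 0 []))

-- what B's loop body adds for a message, at the character level
def pvBName (cs : List Char) : Option (List Char) :=
  let idx := PySem.Chars.find cs pvM
  if idx = -1 then none
  else
    let start := PySem.Chars.rfindFrom cs pvNL 0 (some idx) + 1
    some (PySem.Chars.strip (PySem.List.slice cs (some start) (some idx)))

-- ---------- find ----------
theorem pv_find_nil (m : List Char) (hm : m ≠ []) : PySem.Chars.find [] m = -1 := by
  simp [PySem.Chars.find, PySem.Chars.find.go, List.isEmpty_iff, hm]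

theorem pv_find_go_succ (m : List Char) :
    ∀ (l : List Char) (k : Nat),
      PySem.Chars.find.go m l (k + 1)
        = if PySem.Chars.find.go m l k = -1 then -1 else PySem.Chars.find.go m l k + 1 := by
  intro l
  induction l with
  | nil =>
      intro k
      simp only [PySem.Chars.find.go]
      split_ifs <;> omega
  | cons c t ih =>
      intro k
      simp only [PySem.Chars.find.go]
      split
      · simp
      · exact ih (k + 1)

theorem pv_find_cons (m : List Char) (x : Char) (l : List Char) :
    PySem.Chars.find (x :: l) m
      = if m.isPrefixOf (x :: l) then 0
        else if PySem.Chars.find l m = -1 then -1 else PySem.Chars.find l m + 1 := by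
  simp only [PySem.Chars.find, PySem.Chars.find.go]
  split
  · rfl
  · exact pv_find_go_succ m l 0

theorem pv_find_eq_zero_of_prefix (m l : List Char) (hl : m.isPrefixOf l) (hm : m ≠ []) :
    PySem.Chars.find l m = 0 := by
  cases l with
  | nil =>
      exfalso
      exact hm (List.prefix_nil.mp (List.isPrefixOf_iff_prefix.mp hl))
  | cons c t => rw [pv_find_cons, if_pos hl]

-- ---------- prefix through the first newline ----------
theorem pv_prefix_newline (m a r : List Char) (hnm : '\n' ∉ m) :
    m.isPrefixOf (a ++ '\n' :: r) = m.isPrefixOf a := by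
  by_cases hle : m.length ≤ a.length
  · rw [Bool.eq_iff_iff, List.isPrefixOf_iff_prefix, List.isPrefixOf_iff_prefix,
      List.prefix_iff_eq_take, List.prefix_iff_eq_take, List.take_append_of_le_length hle]
  · have h2 : m.isPrefixOf a = false := by
      rw [Bool.eq_false_iff]
      intro h
      exact hle (List.IsPrefix.length_le (List.isPrefixOf_iff_prefix.mp h))
    rw [h2, Bool.eq_false_iff]
    intro h
    have hpre := List.isPrefixOf_iff_prefix.mp h
    have hlen : a.length < m.length := by omega
    have hlen2 : a.length < (a ++ '\n' :: r).length := by simp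
    obtain ⟨t, ht⟩ := hpre
    have hlen3 : a.length < (m ++ t).length := by rw [ht]; exact hlen2
    have h4 : (m ++ t)[a.length]'hlen3 = m[a.length]'hlen := List.getElem_append_left hlen
    have h5 : (m ++ t)[a.length]'hlen3 = (a ++ '\n' :: r)[a.length]'hlen2 := List.getElem_of_eq ht hlen3
    have h3 : (a ++ '\n' :: r)[a.length]'hlen2 = '\n' := by
      rw [List.getElem_append_right (le_refl a.length)]
      simp
    exact hnm (by rw [← h3, ← h5, h4]; exact List.getElem_mem hlen)

-- find across the first newline
theorem pv_find_append (m : List Char) (hm : m ≠ []) (hnm : '\n' ∉ m) :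
    ∀ (a r : List Char),
      PySem.Chars.find (a ++ '\n' :: r) m
        = if PySem.Chars.find a m = -1 then
            (if PySem.Chars.find r m = -1 then -1 else a.length + 1 + PySem.Chars.find r m)
          else PySem.Chars.find a m := by
  intro a
  induction a with
  | nil =>
      intro r
      have hnp : m.isPrefixOf ('\n' :: r) = false := by
        rw [Bool.eq_false_iff]
        intro h
        cases m with
        | nil => exact hm rfl
        | cons c t =>
            have := List.isPrefixOf_iff_prefix.mp h
            have hc : c = '\n' := by
              have := List.prefix_iff_eq_take.mp this
              simpa using congrArg (fun l => l.head?) this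
            exact hnm (by simp [hc])
      rw [List.nil_append, pv_find_cons, hnp, pv_find_nil m hm]
      simp only [Bool.false_eq_true, if_false, List.length_nil, Nat.cast_zero]
      split_ifs <;> omega
  | cons x a' ih =>
      intro r
      have e1 : (x :: a') ++ '\n' :: r = x :: (a' ++ '\n' :: r) := rfl
      have h6 : m.isPrefixOf (x :: (a' ++ '\n' :: r)) = m.isPrefixOf (x :: a') :=
        pv_prefix_newline m (x :: a') r hnm
      rw [e1, pv_find_cons, h6, pv_find_cons m x a', ih r]
      have h1 := PySem.Chars.neg_one_le_find a' m
      have h2 := PySem.Chars.neg_one_le_find r m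
      simp only [List.length_cons]
      split_ifs <;> push_cast <;> first | omega | simp_all

-- ---------- splitOn on the newline separator ----------
def pvSplitNL : List Char → List Char → List (List Char)
  | [], cur => [cur.reverse]
  | c :: rest, cur => if c = '\n' then cur.reverse :: pvSplitNL rest [] else pvSplitNL rest (c :: cur)

theorem pv_splitOn_go_nl :
    ∀ (fuel : Nat) (l cur : List Char) (acc : List (List Char)), l.length < fuel →
      PySem.Chars.splitOn.go pvNL fuel l cur acc = acc.reverse ++ pvSplitNL l cur := by
  intro fuel
  induction fuel with
  | zero => intro l cur acc h; omega
  | succ f ih =>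
      intro l cur acc h
      cases l with
      | nil => simp [PySem.Chars.splitOn.go, pvSplitNL]
      | cons c rest =>
          have hpf : pvNL.isPrefixOf (c :: rest) = (c == '\n') := by
            simp [pvNL, List.isPrefixOf, BEq.comm]
          simp only [PySem.Chars.splitOn.go, hpf]
          by_cases hc : c = '\n'
          · simp only [hc, beq_self_eq_true, if_pos]
            have hd : List.drop pvNL.length ('\n' :: rest) = rest := by simp [pvNL]
            rw [hd, ih rest [] (cur.reverse :: acc) (by simp at h ⊢; omega)]
            simp [pvSplitNL]
          · have : (c == '\n') = false := by simp [hc]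
            simp only [this, Bool.false_eq_true, if_false]
            rw [ih rest (c :: cur) acc (by simp at h ⊢; omega)]
            simp [pvSplitNL, hc]

theorem pv_splitOn_nl (l : List Char) :
    PySem.Chars.splitOn l pvNL = pvSplitNL l [] := by
  rw [PySem.Chars.splitOn, pv_splitOn_go_nl (l.length + 1) l [] [] (by omega)]
  simp

theorem pvSplitNL_no (l : List Char) (h : '\n' ∉ l) :
    ∀ cur, pvSplitNL l cur = [cur.reverse ++ l] := by
  induction l with
  | nil => intro cur; simp [pvSplitNL]
  | cons c rest ih =>
      intro cur
      have hc : ¬ c = '\n' := fun hc => h (by simp [hc])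
      rw [pvSplitNL, if_neg hc, ih (fun hm => h (List.mem_cons_of_mem c hm)) (c :: cur)]
      simp

theorem pvSplitNL_app (a r : List Char) (ha : '\n' ∉ a) :
    ∀ cur, pvSplitNL (a ++ '\n' :: r) cur = (cur.reverse ++ a) :: pvSplitNL r [] := by
  induction a with
  | nil => intro cur; simp [pvSplitNL]
  | cons c rest ih =>
      intro cur
      have hc : ¬ c = '\n' := fun hc => ha (by simp [hc])
      rw [List.cons_append, pvSplitNL, if_neg hc,
        ih (fun hm => ha (List.mem_cons_of_mem c hm)) (c :: cur)]
      simp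

-- ---------- the first piece of splitOn on the marker ----------
theorem pv_splitOn_go_first (m : List Char) (hm : m ≠ []) :
    ∀ (fuel : Nat) (l cur : List Char) (acc : List (List Char)), l.length < fuel →
      ∃ tail, PySem.Chars.splitOn.go m fuel l cur acc
        = acc.reverse ++ (cur.reverse ++ l.take (if PySem.Chars.find l m = -1 then l.length
            else (PySem.Chars.find l m).toNat)) :: tail := by
  intro fuel
  induction fuel with
  | zero => intro l cur acc h; omega
  | succ f ih =>
      intro l cur acc h
      cases l with
      | nil =>
          refine ⟨[], ?_⟩
          rw [pv_find_nil m hm]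
          simp [PySem.Chars.splitOn.go]
      | cons c rest =>
          by_cases hpf : m.isPrefixOf (c :: rest)
          · have hf0 : PySem.Chars.find (c :: rest) m = 0 := pv_find_eq_zero_of_prefix m _ hpf hm
            have hmlen : 1 ≤ m.length := by cases m with | nil => exact absurd rfl hm | cons _ _ => simp
            obtain ⟨tail, htail⟩ := ih (List.drop m.length (c :: rest)) [] (cur.reverse :: acc)
              (by have := List.length_drop (l := c :: rest) (i := m.length); simp at h ⊢; omega)
            refine ⟨(List.take (if PySem.Chars.find (List.drop m.length (c :: rest)) m = -1
                then (List.drop m.length (c :: rest)).length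
                else (PySem.Chars.find (List.drop m.length (c :: rest)) m).toNat)
                (List.drop m.length (c :: rest))) :: tail, ?_⟩
            simp only [PySem.Chars.splitOn.go, hpf, if_pos, hf0]
            rw [htail]
            simp
          · obtain ⟨tail, htail⟩ := ih rest (c :: cur) acc (by simp at h ⊢; omega)
            refine ⟨tail, ?_⟩
            have hnp : m.isPrefixOf (c :: rest) = false := by simp [hpf]
            simp only [PySem.Chars.splitOn.go, hnp, Bool.false_eq_true, if_false]
            rw [htail, pv_find_cons, hnp]
            simp only [Bool.false_eq_true, if_false]
            have h1 := PySem.Chars.neg_one_le_find rest m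
            by_cases hfr : PySem.Chars.find rest m = -1
            · simp [hfr, List.take_of_length_le]
            · have h3 : ¬ (PySem.Chars.find rest m + 1 = -1) := by omega
              have h2 : (PySem.Chars.find rest m + 1).toNat = (PySem.Chars.find rest m).toNat + 1 := by omega
              simp [hfr, h3, h2, List.take_succ_cons]

theorem pv_splitOn_first (m l : List Char) (hm : m ≠ []) :
    PySem.List.pyGetD (PySem.Chars.splitOn l m) 0 []
      = if PySem.Chars.find l m = -1 then l else l.take (PySem.Chars.find l m).toNat := by
  obtain ⟨tail, htail⟩ := pv_splitOn_go_first m hm (l.length + 1) l [] [] (by omega)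
  rw [PySem.Chars.splitOn, htail]
  simp only [List.reverse_nil, List.nil_append, PySem.List.pyGetD_zero_cons]
  split <;> simp [List.take_of_length_le]

-- ---------- rfind on the newline ----------
theorem pv_nl_prefix_false (t : List Char) (h : '\n' ∉ t) :
    pvNL.isPrefixOf t = false := by
  cases t with
  | nil => rfl
  | cons c rest =>
      have hc : ¬ c = '\n' := fun hc => h (by simp [hc])
      simp [pvNL, List.isPrefixOf]
      exact fun hh => absurd hh.symm hc

theorem pv_rfind_go_none (t : List Char) (h : '\n' ∉ t) :
    ∀ j, PySem.Chars.rfind.go t pvNL j = -1 := by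
  intro j
  induction j with
  | zero =>
      rw [PySem.Chars.rfind.go, pv_nl_prefix_false t h]
      simp
  | succ j ih =>
      rw [PySem.Chars.rfind.go,
        pv_nl_prefix_false _ (fun hm => h (List.mem_of_mem_drop hm))]
      simpa using ih

theorem pv_rfind_none (t : List Char) (h : '\n' ∉ t) :
    PySem.Chars.rfind t pvNL = -1 := by
  rw [PySem.Chars.rfind]
  exact pv_rfind_go_none t h t.length

theorem pv_rfind_go_at_len (a t : List Char) :
    PySem.Chars.rfind.go (a ++ '\n' :: t) pvNL a.length = (a.length : Int) := by
  cases ha : a.length with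
  | zero =>
      have : a = [] := List.eq_nil_of_length_eq_zero ha
      subst this
      rw [PySem.Chars.rfind.go]
      simp [pvNL, List.isPrefixOf]
  | succ k =>
      rw [PySem.Chars.rfind.go]
      have hd : List.drop (k + 1) (a ++ '\n' :: t) = '\n' :: t := by
        rw [← ha, List.drop_left]
      rw [hd]
      simp [pvNL, List.isPrefixOf]

theorem pv_drop_shift (a t : List Char) (j : Nat) :
    List.drop (a.length + 1 + j) (a ++ '\n' :: t) = List.drop j t := by
  have e : a ++ '\n' :: t = (a ++ ['\n']) ++ t := by simp
  rw [e, List.drop_append]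
  have h1 : List.drop (a.length + 1 + j) (a ++ ['\n']) = [] :=
    List.drop_eq_nil_of_le (by simp)
  have h2 : a.length + 1 + j - (a ++ ['\n']).length = j := by simp
  rw [h1, h2, List.nil_append]

theorem pv_rfind_go_append (a t : List Char) :
    ∀ j, j ≤ t.length →
      PySem.Chars.rfind.go (a ++ '\n' :: t) pvNL (a.length + 1 + j)
        = if PySem.Chars.rfind.go t pvNL j = -1 then (a.length : Int)
          else (a.length : Int) + 1 + PySem.Chars.rfind.go t pvNL j := by
  intro j
  induction j with
  | zero =>
      intro _
      have e : a.length + 1 + 0 = a.length + 1 := rfl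
      rw [e]
      simp only [PySem.Chars.rfind.go]
      have hd : List.drop (a.length + 1) (a ++ '\n' :: t) = t := by
        simpa using pv_drop_shift a t 0
      rw [hd, pv_rfind_go_at_len a t]
      by_cases hp : pvNL.isPrefixOf t
      · simp [hp]
      · simp [hp]
  | succ j ih =>
      intro hj
      have e : a.length + 1 + (j + 1) = (a.length + 1 + j) + 1 := by ring
      rw [e]
      simp only [PySem.Chars.rfind.go]
      have hd : List.drop (a.length + 1 + j + 1) (a ++ '\n' :: t) = List.drop (j + 1) t := by
        have : a.length + 1 + j + 1 = a.length + 1 + (j + 1) := by ring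
        rw [this, pv_drop_shift a t (j + 1)]
      rw [hd]
      by_cases hp : pvNL.isPrefixOf (List.drop (j + 1) t)
      · simp only [hp, if_pos]
        push_cast
        split_ifs <;> omega
      · simp only [hp, Bool.false_eq_true, if_false]
        exact ih (by omega)

theorem pv_rfind_append (a t : List Char) :
    PySem.Chars.rfind (a ++ '\n' :: t) pvNL
      = if PySem.Chars.rfind t pvNL = -1 then (a.length : Int)
        else (a.length : Int) + 1 + PySem.Chars.rfind t pvNL := by
  rw [PySem.Chars.rfind, PySem.Chars.rfind]
  have e : (a ++ '\n' :: t).length = a.length + 1 + t.length := by simp; omega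
  rw [e]
  exact pv_rfind_go_append a t t.length (le_refl _)

-- ---------- rfindFrom with bounds 0 .. idx ----------
theorem pv_rfindFrom_eq (cs : List Char) (i : Int) (h0 : 0 ≤ i) (hle : i ≤ (cs.length : Int)) :
    PySem.Chars.rfindFrom cs pvNL 0 (some i)
      = if PySem.Chars.rfind (cs.take i.toNat) pvNL = -1 then -1
        else PySem.Chars.rfind (cs.take i.toNat) pvNL := by
  simp only [PySem.Chars.rfindFrom]
  rw [if_neg (by omega : ¬ ((cs.length : Int) < i)), if_neg (by omega : ¬ (i < 0)),
    if_neg (by omega : ¬ ((0 : Int) < 0)), if_neg (by omega : ¬ (i < 0))]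
  simp

-- ---------- bounds for rfind.go ----------
theorem pv_neg_one_le_rfind_go (s sub : List Char) :
    ∀ j, -1 ≤ PySem.Chars.rfind.go s sub j := by
  intro j
  induction j with
  | zero => rw [PySem.Chars.rfind.go]; split <;> omega
  | succ j ih =>
      rw [PySem.Chars.rfind.go]
      split
      · omega
      · exact ih

-- ---------- B's branch written with rfind over the prefix ----------
theorem pvBName_some (cs : List Char) (hf : ¬ PySem.Chars.find cs pvM = -1) :
    pvBName cs
      = some (PySem.Chars.strip (PySem.List.slice cs
          (some ((if PySem.Chars.rfind (cs.take (PySem.Chars.find cs pvM).toNat) pvNL = -1 then -1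
                  else PySem.Chars.rfind (cs.take (PySem.Chars.find cs pvM).toNat) pvNL) + 1))
          (some (PySem.Chars.find cs pvM)))) := by
  have h0 : 0 ≤ PySem.Chars.find cs pvM := by
    have := PySem.Chars.neg_one_le_find cs pvM; omega
  have hle := PySem.Chars.find_le_length cs pvM
  simp only [pvBName, hf, if_false]
  rw [pv_rfindFrom_eq cs _ h0 hle]

-- ---------- case: no newline in the message ----------
theorem pv_case_nonl (cs : List Char) (hno : '\n' ∉ cs) : pvAName cs = pvBName cs := by
  have hm : pvM ≠ [] := by decide
  by_cases hf : PySem.Chars.find cs pvM = -1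
  · have hisin : PySem.Chars.isIn pvM cs = false := by simp [PySem.Chars.isIn, hf]
    simp [pvAName, pvBName, pv_splitOn_nl, pvSplitNL_no cs hno [], hisin, hf]
  · have h0 : 0 ≤ PySem.Chars.find cs pvM := by
      have := PySem.Chars.neg_one_le_find cs pvM; omega
    have hisin : PySem.Chars.isIn pvM cs = true := by simp [PySem.Chars.isIn, hf]
    have hrf : PySem.Chars.rfind (cs.take (PySem.Chars.find cs pvM).toNat) pvNL = -1 :=
      pv_rfind_none _ (fun hmem => hno (List.mem_of_mem_take hmem))
    rw [pvBName_some cs hf, if_pos hrf]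
    have hslice : PySem.List.slice cs (some ((-1 : Int) + 1)) (some (PySem.Chars.find cs pvM))
        = cs.take (PySem.Chars.find cs pvM).toNat := by
      rw [(by omega : (-1 : Int) + 1 = 0), PySem.List.slice_toNat cs (by omega) h0]
      simp
    rw [hslice]
    simp only [pvAName, pv_splitOn_nl, pvSplitNL_no cs hno [], List.reverse_nil,
      List.nil_append, List.filter_cons, hisin, if_pos]
    rw [pv_splitOn_first pvM cs hm, if_neg hf]

-- ---------- case: first line holds the marker ----------
theorem pv_case_hit (a r : List Char) (ha : '\n' ∉ a)
    (hfa : ¬ PySem.Chars.find a pvM = -1) :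
    pvAName (a ++ '\n' :: r) = pvBName (a ++ '\n' :: r) := by
  have hm : pvM ≠ [] := by decide
  have hnm : '\n' ∉ pvM := by decide
  have h0 : 0 ≤ PySem.Chars.find a pvM := by
    have := PySem.Chars.neg_one_le_find a pvM; omega
  have hlea := PySem.Chars.find_le_length a pvM
  have hfind : PySem.Chars.find (a ++ '\n' :: r) pvM = PySem.Chars.find a pvM := by
    rw [pv_find_append pvM hm hnm a r, if_neg hfa]
  have hfcs : ¬ PySem.Chars.find (a ++ '\n' :: r) pvM = -1 := by rw [hfind]; exact hfa
  have htake : (a ++ '\n' :: r).take (PySem.Chars.find (a ++ '\n' :: r) pvM).toNat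
      = a.take (PySem.Chars.find a pvM).toNat := by
    rw [hfind, List.take_append_of_le_length (by omega)]
  have hrf : PySem.Chars.rfind (a.take (PySem.Chars.find a pvM).toNat) pvNL = -1 :=
    pv_rfind_none _ (fun hmem => ha (List.mem_of_mem_take hmem))
  rw [pvBName_some _ hfcs, htake, if_pos hrf]
  have hslice : PySem.List.slice (a ++ '\n' :: r) (some ((-1 : Int) + 1))
      (some (PySem.Chars.find (a ++ '\n' :: r) pvM))
      = a.take (PySem.Chars.find a pvM).toNat := by
    rw [(by omega : (-1 : Int) + 1 = 0), PySem.List.slice_toNat _ (by omega) (by omega)]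
    simp only [List.drop_zero, Int.toNat_zero, Nat.sub_zero]
    rw [hfind, List.take_append_of_le_length (by omega)]
  rw [hslice]
  have hisin : PySem.Chars.isIn pvM a = true := by simp [PySem.Chars.isIn, hfa]
  simp only [pvAName, pv_splitOn_nl, pvSplitNL_app a r ha, List.reverse_nil, List.nil_append,
    List.filter_cons, hisin, if_pos]
  rw [pv_splitOn_first pvM a hm, if_neg hfa]

-- ---------- case: first line has no marker — both sides skip to the tail ----------
theorem pvA_skip (a r : List Char) (ha : '\n' ∉ a)
    (hfa : PySem.Chars.find a pvM = -1) :
    pvAName (a ++ '\n' :: r) = pvAName r := by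
  have hisin : PySem.Chars.isIn pvM a = false := by simp [PySem.Chars.isIn, hfa]
  simp only [pvAName, pv_splitOn_nl, pvSplitNL_app a r ha, List.reverse_nil, List.nil_append,
    List.filter_cons, hisin, Bool.false_eq_true, if_false]

theorem pvB_skip (a r : List Char)
    (hfa : PySem.Chars.find a pvM = -1) :
    pvBName (a ++ '\n' :: r) = pvBName r := by
  have hm : pvM ≠ [] := by decide
  have hnm : '\n' ∉ pvM := by decide
  have hfind := pv_find_append pvM hm hnm a r
  rw [hfa] at hfind
  simp at hfind
  by_cases hr : PySem.Chars.find r pvM = -1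
  · rw [hr] at hfind
    simp at hfind
    simp [pvBName, hfind, hr]
  · have h0r : 0 ≤ PySem.Chars.find r pvM := by
      have := PySem.Chars.neg_one_le_find r pvM; omega
    have hler := PySem.Chars.find_le_length r pvM
    rw [if_neg hr] at hfind
    have hfcs : ¬ PySem.Chars.find (a ++ '\n' :: r) pvM = -1 := by rw [hfind]; omega
    rw [pvBName_some _ hfcs, pvBName_some _ hr]
    have htoNat : (PySem.Chars.find (a ++ '\n' :: r) pvM).toNat
        = a.length + 1 + (PySem.Chars.find r pvM).toNat := by
      rw [hfind]; omega
    have htake : (a ++ '\n' :: r).take (PySem.Chars.find (a ++ '\n' :: r) pvM).toNat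
        = a ++ '\n' :: r.take (PySem.Chars.find r pvM).toNat := by
      rw [htoNat, List.take_append]
      rw [List.take_of_length_le (by omega)]
      congr 1
      have e : a.length + 1 + (PySem.Chars.find r pvM).toNat - a.length
          = (PySem.Chars.find r pvM).toNat + 1 := by omega
      rw [e, List.take_succ_cons]
    rw [htake, pv_rfind_append a (r.take (PySem.Chars.find r pvM).toNat)]
    by_cases hrho : PySem.Chars.rfind (r.take (PySem.Chars.find r pvM).toNat) pvNL = -1
    · rw [if_pos hrho, if_pos hrho, if_neg (by omega : ¬ ((a.length : Int) = -1))]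
      congr 2
      rw [PySem.List.slice_toNat _ (by omega) (by rw [hfind]; omega),
        PySem.List.slice_toNat _ (by omega) h0r]
      have e1 : ((a.length : Int) + 1).toNat = a.length + 1 := by omega
      have e2 : ((-1 : Int) + 1).toNat = 0 := by omega
      rw [e1, e2, htoNat]
      have hdrop : List.drop (a.length + 1) (a ++ '\n' :: r) = r := by
        simpa using pv_drop_shift a r 0
      rw [hdrop, List.drop_zero]
      congr 1
      omega
    · have hrho0 : 0 ≤ PySem.Chars.rfind (r.take (PySem.Chars.find r pvM).toNat) pvNL := by
        have : -1 ≤ PySem.Chars.rfind (r.take (PySem.Chars.find r pvM).toNat) pvNL := by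
          rw [PySem.Chars.rfind]; exact pv_neg_one_le_rfind_go _ _ _
        omega
      rw [if_neg hrho, if_neg hrho,
        if_neg (by omega : ¬ ((a.length : Int) + 1 + PySem.Chars.rfind (r.take (PySem.Chars.find r pvM).toNat) pvNL = -1))]
      congr 2
      rw [PySem.List.slice_toNat _ (by omega) (by rw [hfind]; omega),
        PySem.List.slice_toNat _ (by omega) h0r]
      set ρ := PySem.Chars.rfind (r.take (PySem.Chars.find r pvM).toNat) pvNL with hρ
      have e1 : ((a.length : Int) + 1 + ρ + 1).toNat = a.length + 1 + (ρ + 1).toNat := by omega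
      rw [e1, htoNat]
      have hdrop : List.drop (a.length + 1 + (ρ + 1).toNat) (a ++ '\n' :: r)
          = List.drop ((ρ + 1).toNat) r := pv_drop_shift a r _
      rw [hdrop]
      congr 1
      omega

-- ---------- the per-message equivalence ----------
theorem pvMain0 : ∀ (n : Nat) (cs : List Char), cs.length ≤ n → pvAName cs = pvBName cs := by
  intro n
  induction n with
  | zero =>
      intro cs h
      have : cs = [] := List.eq_nil_of_length_eq_zero (by omega)
      subst this
      decide
  | succ n ih =>
      intro cs hlen
      by_cases hmem : '\n' ∈ cs
      · have hd_ne : List.dropWhile (fun c => c != '\n') cs ≠ [] := by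
          intro hnil
          have := List.dropWhile_eq_nil_iff.mp hnil '\n' hmem
          simp at this
        have hhead : (List.dropWhile (fun c => c != '\n') cs).head hd_ne = '\n' := by
          have := List.head_dropWhile_not (fun c => c != '\n') hd_ne
          simpa using this
        have hdw : List.dropWhile (fun c => c != '\n') cs
            = '\n' :: (List.dropWhile (fun c => c != '\n') cs).tail := by
          conv_lhs => rw [← List.cons_head_tail hd_ne]
          rw [hhead]
        have hcs : cs = List.takeWhile (fun c => c != '\n') cs
            ++ '\n' :: (List.dropWhile (fun c => c != '\n') cs).tail := by
          conv_lhs => rw [← List.takeWhile_append_dropWhile (p := fun c => c != '\n') (l := cs), hdw]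
        set a := List.takeWhile (fun c => c != '\n') cs with hadef
        set r := (List.dropWhile (fun c => c != '\n') cs).tail with hrdef
        have ha : '\n' ∉ a := by
          intro hmm
          have := List.mem_takeWhile_imp hmm
          simp at this
        have hrlen : r.length ≤ n := by
          have h2 := congrArg List.length hcs
          simp at h2
          omega
        rw [hcs]
        by_cases hfa : PySem.Chars.find a pvM = -1
        · rw [pvA_skip a r ha hfa, pvB_skip a r hfa]
          exact ih r hrlen
        · exact pv_case_hit a r ha hfa
      · exact pv_case_nonl cs hmem

theorem pvMain (cs : List Char) : pvAName cs = pvBName cs :=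
  pvMain0 cs.length cs (le_refl _)

theorem pvAStep_eq (acc : PySem.Set String) (mail : List (String × String)) :
    pvAStep acc mail =
      match pvAName ((PySem.Dict.ofList mail).getD "msg" "").toList with
      | none => acc
      | some u => PySem.Set.add acc (String.ofList u) := by
  have h1 : ("\n" : String).toList = ['\n'] := by decide
  have hM : pvMarker.toList.isEmpty = false := by decide
  unfold pvAStep pvAName
  dsimp only
  generalize ((PySem.Dict.ofList mail).getD "msg" "") = msg
  have hsplit : PySem.Str.split? msg "\n"
      = some ((PySem.Chars.splitOn msg.toList ['\n']).map String.ofList) := by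
    simp [PySem.Str.split?, PySem.Chars.split?, h1]
  rw [hsplit]
  have hfil : ((PySem.Chars.splitOn msg.toList ['\n']).map String.ofList).filter
        (fun ln => PySem.Str.isIn pvMarker ln)
      = ((PySem.Chars.splitOn msg.toList ['\n']).filter (fun ln => PySem.Chars.isIn pvM ln)).map String.ofList := by
    rw [List.filter_map]
    congr 1
    refine List.filter_congr (fun l _ => ?_)
    simp [PySem.Str.isIn, pvM]
  simp only [Option.getD_some, hfil, pvNL]
  cases hF : (PySem.Chars.splitOn msg.toList ['\n']).filter (fun ln => PySem.Chars.isIn pvM ln) with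
  | nil => rfl
  | cons l rest =>
      simp only [List.map_cons]
      have hs2 : PySem.Str.split? (String.ofList l) pvMarker
          = some ((PySem.Chars.splitOn l pvM).map String.ofList) := by
        simp [PySem.Str.split?, PySem.Chars.split?, hM, pvM]
      rw [hs2]
      simp only [Option.getD_some]
      cases hK : PySem.Chars.splitOn l pvM with
      | nil =>
          simp only [List.map_nil]
          have : PySem.Str.strip (PySem.List.pyGetD ([] : List String) 0 "")
              = String.ofList (PySem.Chars.strip (PySem.List.pyGetD ([] : List (List Char)) 0 [])) := by decide
          rw [this]
      | cons p ps =>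
          simp [PySem.List.pyGetD_zero_cons, PySem.Str.strip]

theorem pvBStep_eq (acc : PySem.Set String) (mail : List (String × String)) :
    pvBStep acc mail =
      match pvBName ((PySem.Dict.ofList mail).getD "msg" "").toList with
      | none => acc
      | some u => PySem.Set.add acc (String.ofList u) := by
  have h1 : ("\n" : String).toList = ['\n'] := by decide
  by_cases h : PySem.Chars.find ((PySem.Dict.ofList mail).getD "msg" "").toList pvMarker.toList = -1
  · simp [pvBStep, pvBName, PySem.Str.find, pvM, h]
  · simp [pvBStep, pvBName, PySem.Str.find, PySem.Str.rfindFrom, PySem.Str.slice,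
      PySem.Str.strip, pvM, pvNL, h, h1, PySem.Chars.slice_eq_listSlice]

-- ===== VERDICT (by name: the statement is the Claim_ definition above) =====
theorem get_sentry_users_from_mails_spec : Claim_equal_get_sentry_users_from_mails := by
  intro mails hD hP
  unfold Spec_get_sentry_users_from_mails get_sentry_users_from_mails get_sentry_users_from_mails_alt
  induction mails using List.reverseRecOn with
  | nil => rfl
  | append_singleton ms m ih =>
      have hD' : Dom_get_sentry_users_from_mails ms := by
        unfold Dom_get_sentry_users_from_mails at hD ⊢
        simp only [List.all_append, Bool.and_eq_true] at hD
        exact hD.1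
      have hP' : Pre_get_sentry_users_from_mails ms := fun mail hm => hP mail (by simp [hm])
      simp only [List.foldl_append, List.foldl_cons, List.foldl_nil, ih hD' hP',
        pvAStep_eq, pvBStep_eq, pvMain]
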